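-- pv_equiv track=rewrite | github.com/nexuslrf/stable-virtual-camera | state_dict_converter_simple.py | organize_savediff_keys
-- ===== SOURCE A (Python) =====
-- def organize_savediff_keys(savediff_keys):
--     """Organize SaveDiff keys by component type."""
--     organized = {
--         'conv_in': [],
--         'time_embedding': [],
--         'down_blocks': [],
--         'mid_block': [],
--         'up_blocks': [],
--         'conv_out': []
--     }
--
--     for key in savediff_keys:
--         if key.startswith('conv_in.'):
--             organized['conv_in'].append(key)
--         elif key.startswith('time_embedding.'):
--             organized['time_embedding'].append(key)
--         elif key.startswith('down_blocks.'):
--             organized['down_blocks'].append(key)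
--         elif key.startswith('mid_block.'):
--             organized['mid_block'].append(key)
--         elif key.startswith('up_blocks.'):
--             organized['up_blocks'].append(key)
--         elif key.startswith('conv_norm_out.') or key.startswith('conv_out.'):
--             organized['conv_out'].append(key)
--
--     return organized
-- ===== SOURCE B (Python) =====
-- def organize_savediff_keys(savediff_keys):
--     """Organize SaveDiff keys by component type."""
--     prefixes = {
--         'conv_in': ('conv_in.',),
--         'time_embedding': ('time_embedding.',),
--         'down_blocks': ('down_blocks.',),
--         'mid_block': ('mid_block.',),
--         'up_blocks': ('up_blocks.',),
--         'conv_out': ('conv_norm_out.', 'conv_out.'),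
--     }
--     return {group: [key for key in savediff_keys if key.startswith(pats)]
--             for group, pats in prefixes.items()}
-- ===== Notes on version B (the rewrite author's own statement) =====
-- stated objective: idiomatic
-- what changed: Replaces the key-major elif-chain mutating per-group lists in a dict with a group-major dict comprehension: one startswith-filter pass per group over the keys (using a tuple of prefixes for conv_out), valid because the seven dotted prefixes are pairwise non-overlapping.
import Mathlib
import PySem

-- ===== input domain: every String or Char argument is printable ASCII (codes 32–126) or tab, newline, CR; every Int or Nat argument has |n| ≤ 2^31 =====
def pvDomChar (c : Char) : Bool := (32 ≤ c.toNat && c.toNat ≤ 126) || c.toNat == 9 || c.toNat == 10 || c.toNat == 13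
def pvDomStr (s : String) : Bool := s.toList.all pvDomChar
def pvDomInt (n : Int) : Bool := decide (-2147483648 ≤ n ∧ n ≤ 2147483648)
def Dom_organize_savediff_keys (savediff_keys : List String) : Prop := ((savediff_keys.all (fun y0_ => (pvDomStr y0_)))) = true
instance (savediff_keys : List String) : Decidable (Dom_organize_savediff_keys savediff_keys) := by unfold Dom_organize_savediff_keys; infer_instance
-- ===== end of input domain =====

-- B replaces A's key-major elif-chain (dict of mutated lists) by a group-major dict
-- comprehension filtering the keys once per group; same return value, objective: idiomatic.

-- ===== PORT A =====
-- one iteration of A's for-loop (the elif chain, mutating the dict)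
def pvStepA (d : PySem.Dict String (List String)) (key : String) : PySem.Dict String (List String) :=
  if PySem.Str.startswith key "conv_in." then d.modify "conv_in" [] (· ++ [key])
  else if PySem.Str.startswith key "time_embedding." then d.modify "time_embedding" [] (· ++ [key])
  else if PySem.Str.startswith key "down_blocks." then d.modify "down_blocks" [] (· ++ [key])
  else if PySem.Str.startswith key "mid_block." then d.modify "mid_block" [] (· ++ [key])
  else if PySem.Str.startswith key "up_blocks." then d.modify "up_blocks" [] (· ++ [key])
  else if PySem.Str.startswith key "conv_norm_out." || PySem.Str.startswith key "conv_out." then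
    d.modify "conv_out" [] (· ++ [key])
  else d

def organize_savediff_keys (savediff_keys : List String) : List (String × List String) :=
  (savediff_keys.foldl pvStepA
    (PySem.Dict.ofList [("conv_in", []), ("time_embedding", []), ("down_blocks", []),
                        ("mid_block", []), ("up_blocks", []), ("conv_out", [])])).items

-- ===== PORT B =====
-- key.startswith(pats) for a tuple of prefixes
def pvHitsB (key : String) (pats : List String) : Bool :=
  pats.any (fun p => PySem.Str.startswith key p)

def organize_savediff_keys_alt (savediff_keys : List String) : List (String × List String) :=
  [("conv_in", ["conv_in."]), ("time_embedding", ["time_embedding."]),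
   ("down_blocks", ["down_blocks."]), ("mid_block", ["mid_block."]),
   ("up_blocks", ["up_blocks."]), ("conv_out", ["conv_norm_out.", "conv_out."])].map
    (fun gp => (gp.1, savediff_keys.filter (fun key => pvHitsB key gp.2)))

-- ===== PRECONDITION & SPEC =====
def Spec_organize_savediff_keys (savediff_keys : List String) (out : List (String × List String)) : Prop := out = organize_savediff_keys_alt savediff_keys
instance (savediff_keys : List String) (out : List (String × List String)) : Decidable (Spec_organize_savediff_keys savediff_keys out) := by unfold Spec_organize_savediff_keys; infer_instance

-- ===== CLAIM (what is proved, stated in full; the proofs are below) =====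
def Claim_equal_organize_savediff_keys : Prop := ∀ (savediff_keys : List String), Dom_organize_savediff_keys savediff_keys → Spec_organize_savediff_keys savediff_keys (organize_savediff_keys savediff_keys)

-- ===== LEMMAS AND PROOFS =====

-- two incomparable prefixes cannot both start the same string
lemma pv_excl {s p q : List Char} (hpq : ¬ p <+: q) (hqp : ¬ q <+: p)
    (h : PySem.Chars.startswith s p = true) : PySem.Chars.startswith s q = false := by
  rw [PySem.Chars.startswith_iff] at h
  by_contra hq
  rw [Bool.not_eq_false, PySem.Chars.startswith_iff] at hq
  rcases List.prefix_or_prefix_of_prefix h hq with h' | h'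
  · exact hpq h'
  · exact hqp h'

lemma pv_excl_str {s : String} {p q : String} (hpq : ¬ p.toList <+: q.toList)
    (hqp : ¬ q.toList <+: p.toList)
    (h : PySem.Str.startswith s p = true) : PySem.Str.startswith s q = false := by
  simp only [PySem.Str.startswith_eq] at *
  exact pv_excl hpq hqp h

-- the loop invariant: running A's loop from any six-bucket state appends the filters
lemma pv_main (keys : List String) : ∀ (l1 l2 l3 l4 l5 l6 : List String),
    (keys.foldl pvStepA
      (PySem.Dict.mk [("conv_in", l1), ("time_embedding", l2), ("down_blocks", l3),
                      ("mid_block", l4), ("up_blocks", l5), ("conv_out", l6)])).items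
    = [("conv_in", l1 ++ keys.filter (fun k => pvHitsB k ["conv_in."])),
       ("time_embedding", l2 ++ keys.filter (fun k => pvHitsB k ["time_embedding."])),
       ("down_blocks", l3 ++ keys.filter (fun k => pvHitsB k ["down_blocks."])),
       ("mid_block", l4 ++ keys.filter (fun k => pvHitsB k ["mid_block."])),
       ("up_blocks", l5 ++ keys.filter (fun k => pvHitsB k ["up_blocks."])),
       ("conv_out", l6 ++ keys.filter (fun k => pvHitsB k ["conv_norm_out.", "conv_out."]))] := by
  induction keys with
  | nil => intro l1 l2 l3 l4 l5 l6; simp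
  | cons k keys ih =>
    intro l1 l2 l3 l4 l5 l6
    simp only [List.foldl_cons, pvStepA]
    by_cases h1 : PySem.Str.startswith k "conv_in." = true
    · have e00 : PySem.Str.startswith k "time_embedding." = false := pv_excl_str (p := "conv_in.") (by decide) (by decide) h1
      have e01 : PySem.Str.startswith k "down_blocks." = false := pv_excl_str (p := "conv_in.") (by decide) (by decide) h1
      have e02 : PySem.Str.startswith k "mid_block." = false := pv_excl_str (p := "conv_in.") (by decide) (by decide) h1
      have e03 : PySem.Str.startswith k "up_blocks." = false := pv_excl_str (p := "conv_in.") (by decide) (by decide) h1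
      have e04 : PySem.Str.startswith k "conv_norm_out." = false := pv_excl_str (p := "conv_in.") (by decide) (by decide) h1
      have e05 : PySem.Str.startswith k "conv_out." = false := pv_excl_str (p := "conv_in.") (by decide) (by decide) h1
      rw [if_pos h1]
      rw [show (PySem.Dict.mk [("conv_in", l1), ("time_embedding", l2), ("down_blocks", l3), ("mid_block", l4), ("up_blocks", l5), ("conv_out", l6)]).modify "conv_in" [] (· ++ [k]) = PySem.Dict.mk [("conv_in", l1 ++ [k]), ("time_embedding", l2), ("down_blocks", l3), ("mid_block", l4), ("up_blocks", l5), ("conv_out", l6)] from rfl, ih]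
      clear ih; simp_all [pvHitsB]
    by_cases h2 : PySem.Str.startswith k "time_embedding." = true
    · have e10 : PySem.Str.startswith k "down_blocks." = false := pv_excl_str (p := "time_embedding.") (by decide) (by decide) h2
      have e11 : PySem.Str.startswith k "mid_block." = false := pv_excl_str (p := "time_embedding.") (by decide) (by decide) h2
      have e12 : PySem.Str.startswith k "up_blocks." = false := pv_excl_str (p := "time_embedding.") (by decide) (by decide) h2
      have e13 : PySem.Str.startswith k "conv_norm_out." = false := pv_excl_str (p := "time_embedding.") (by decide) (by decide) h2
      have e14 : PySem.Str.startswith k "conv_out." = false := pv_excl_str (p := "time_embedding.") (by decide) (by decide) h2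
      rw [if_neg h1, if_pos h2]
      rw [show (PySem.Dict.mk [("conv_in", l1), ("time_embedding", l2), ("down_blocks", l3), ("mid_block", l4), ("up_blocks", l5), ("conv_out", l6)]).modify "time_embedding" [] (· ++ [k]) = PySem.Dict.mk [("conv_in", l1), ("time_embedding", l2 ++ [k]), ("down_blocks", l3), ("mid_block", l4), ("up_blocks", l5), ("conv_out", l6)] from rfl, ih]
      clear ih; simp_all [pvHitsB]
    by_cases h3 : PySem.Str.startswith k "down_blocks." = true
    · have e20 : PySem.Str.startswith k "mid_block." = false := pv_excl_str (p := "down_blocks.") (by decide) (by decide) h3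
      have e21 : PySem.Str.startswith k "up_blocks." = false := pv_excl_str (p := "down_blocks.") (by decide) (by decide) h3
      have e22 : PySem.Str.startswith k "conv_norm_out." = false := pv_excl_str (p := "down_blocks.") (by decide) (by decide) h3
      have e23 : PySem.Str.startswith k "conv_out." = false := pv_excl_str (p := "down_blocks.") (by decide) (by decide) h3
      rw [if_neg h1, if_neg h2, if_pos h3]
      rw [show (PySem.Dict.mk [("conv_in", l1), ("time_embedding", l2), ("down_blocks", l3), ("mid_block", l4), ("up_blocks", l5), ("conv_out", l6)]).modify "down_blocks" [] (· ++ [k]) = PySem.Dict.mk [("conv_in", l1), ("time_embedding", l2), ("down_blocks", l3 ++ [k]), ("mid_block", l4), ("up_blocks", l5), ("conv_out", l6)] from rfl, ih]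
      clear ih; simp_all [pvHitsB]
    by_cases h4 : PySem.Str.startswith k "mid_block." = true
    · have e30 : PySem.Str.startswith k "up_blocks." = false := pv_excl_str (p := "mid_block.") (by decide) (by decide) h4
      have e31 : PySem.Str.startswith k "conv_norm_out." = false := pv_excl_str (p := "mid_block.") (by decide) (by decide) h4
      have e32 : PySem.Str.startswith k "conv_out." = false := pv_excl_str (p := "mid_block.") (by decide) (by decide) h4
      rw [if_neg h1, if_neg h2, if_neg h3, if_pos h4]
      rw [show (PySem.Dict.mk [("conv_in", l1), ("time_embedding", l2), ("down_blocks", l3), ("mid_block", l4), ("up_blocks", l5), ("conv_out", l6)]).modify "mid_block" [] (· ++ [k]) = PySem.Dict.mk [("conv_in", l1), ("time_embedding", l2), ("down_blocks", l3), ("mid_block", l4 ++ [k]), ("up_blocks", l5), ("conv_out", l6)] from rfl, ih]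
      clear ih; simp_all [pvHitsB]
    by_cases h5 : PySem.Str.startswith k "up_blocks." = true
    · have e40 : PySem.Str.startswith k "conv_norm_out." = false := pv_excl_str (p := "up_blocks.") (by decide) (by decide) h5
      have e41 : PySem.Str.startswith k "conv_out." = false := pv_excl_str (p := "up_blocks.") (by decide) (by decide) h5
      rw [if_neg h1, if_neg h2, if_neg h3, if_neg h4, if_pos h5]
      rw [show (PySem.Dict.mk [("conv_in", l1), ("time_embedding", l2), ("down_blocks", l3), ("mid_block", l4), ("up_blocks", l5), ("conv_out", l6)]).modify "up_blocks" [] (· ++ [k]) = PySem.Dict.mk [("conv_in", l1), ("time_embedding", l2), ("down_blocks", l3), ("mid_block", l4), ("up_blocks", l5 ++ [k]), ("conv_out", l6)] from rfl, ih]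
      clear ih; simp_all [pvHitsB]
    by_cases h6 : (PySem.Str.startswith k "conv_norm_out." || PySem.Str.startswith k "conv_out.") = true
    · rw [if_neg h1, if_neg h2, if_neg h3, if_neg h4, if_neg h5, if_pos h6]
      rw [show (PySem.Dict.mk [("conv_in", l1), ("time_embedding", l2), ("down_blocks", l3), ("mid_block", l4), ("up_blocks", l5), ("conv_out", l6)]).modify "conv_out" [] (· ++ [k]) = PySem.Dict.mk [("conv_in", l1), ("time_embedding", l2), ("down_blocks", l3), ("mid_block", l4), ("up_blocks", l5), ("conv_out", l6 ++ [k])] from rfl, ih]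
      clear ih; simp_all [pvHitsB]
    · rw [if_neg h1, if_neg h2, if_neg h3, if_neg h4, if_neg h5, if_neg h6, ih]
      clear ih; simp_all [pvHitsB]

-- ===== VERDICT (by name: the statement is the Claim_ definition above) =====
theorem organize_savediff_keys_spec : Claim_equal_organize_savediff_keys := by
  intro keys _
  unfold Spec_organize_savediff_keys organize_savediff_keys organize_savediff_keys_alt
  rw [show (PySem.Dict.ofList [("conv_in", ([] : List String)), ("time_embedding", []), ("down_blocks", []),
        ("mid_block", []), ("up_blocks", []), ("conv_out", [])])
      = PySem.Dict.mk [("conv_in", []), ("time_embedding", []), ("down_blocks", []),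
        ("mid_block", []), ("up_blocks", []), ("conv_out", [])] from by decide]
  rw [pv_main]
  simp
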